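-- pv_equiv track=rewrite | github.com/Cornelius-Chen/A-Share-Quant_TrY | src/a_share_quant/data/data_audit.py | _duplicate_key_count
-- ===== SOURCE A (Python) =====
-- def _duplicate_key_count(rows: list[dict[str, str]], primary_key: list[str]) -> int:
--     if not primary_key:
--         return 0
--     seen: set[tuple[str, ...]] = set()
--     duplicates = 0
--     for row in rows:
--         key = tuple(str(row.get(field, "")) for field in primary_key)
--         if key in seen:
--             duplicates += 1
--         else:
--             seen.add(key)
--     return duplicates
-- ===== SOURCE B (Python) =====
-- def _duplicate_key_count(rows: list[dict[str, str]], primary_key: list[str]) -> int: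
--     if not primary_key:
--         return 0
--     keys = sorted(tuple(str(row.get(field, "")) for field in primary_key) for row in rows)
--     return sum(1 for a, b in zip(keys, keys[1:]) if a == b)
-- ===== Notes on version B (the rewrite author's own statement) =====
-- stated objective: alternative
-- what changed: Replaced the hash-set membership scan by sort-then-adjacent-scan: sort the key tuples and count adjacent equal pairs, which equals total rows minus distinct keys, i.e. the number of duplicate rows; no set or per-row membership test remains.
import Mathlib
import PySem

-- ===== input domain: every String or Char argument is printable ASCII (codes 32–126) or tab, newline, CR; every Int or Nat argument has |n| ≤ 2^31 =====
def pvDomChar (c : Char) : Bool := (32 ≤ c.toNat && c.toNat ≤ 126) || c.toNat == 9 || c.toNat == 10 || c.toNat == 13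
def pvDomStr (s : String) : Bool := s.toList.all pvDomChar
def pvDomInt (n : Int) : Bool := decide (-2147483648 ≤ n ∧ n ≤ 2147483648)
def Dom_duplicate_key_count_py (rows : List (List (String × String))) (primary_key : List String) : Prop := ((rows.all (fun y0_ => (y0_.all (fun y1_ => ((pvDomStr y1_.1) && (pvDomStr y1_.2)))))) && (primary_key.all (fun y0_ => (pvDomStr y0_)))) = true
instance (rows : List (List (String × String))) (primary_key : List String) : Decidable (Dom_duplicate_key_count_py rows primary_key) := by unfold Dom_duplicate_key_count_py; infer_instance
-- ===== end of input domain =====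

-- B sorts the key tuples and counts adjacent equal pairs (= rows minus distinct keys) instead of A's incremental seen-set scan (objective: alternative).

-- row.get(field, ""): first-match lookup in the association list (dict convention)
def pvRowGet (row : List (String × String)) (field : String) : String :=
  ((row.find? (fun p => p.1 == field)).map (fun p => p.2)).getD ""

-- ===== PORT A =====
def duplicate_key_count_py (rows : List (List (String × String))) (primary_key : List String) : Int :=
  if primary_key = [] then 0
  else
    (rows.foldl
      (fun (st : PySem.Set (List String) × Int) row =>
        let key := primary_key.map (fun field => pvRowGet row field)
        if PySem.Set.contains st.1 key then (st.1, st.2 + 1)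
        else (PySem.Set.add st.1 key, st.2))
      (PySem.Set.empty, 0)).2

-- ===== PORT B =====
def duplicate_key_count_py_alt (rows : List (List (String × String))) (primary_key : List String) : Int :=
  if primary_key = [] then 0
  else
    let keys := @PySem.List.sorted (List String) (List String) List.instLinearOrder.toLT LinearOrder.toDecidableLT
      (rows.map (fun row => primary_key.map (fun field => pvRowGet row field))) (fun x => x) false
    -- sum(1 for a, b in zip(keys, keys[1:]) if a == b)
    ((keys.zip (keys.drop 1)).countP (fun p => p.1 == p.2) : Int)

-- ===== PRECONDITION & SPEC =====
def Spec_duplicate_key_count_py (rows : List (List (String × String))) (primary_key : List String) (out : Int) : Prop := out = duplicate_key_count_py_alt rows primary_key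
instance (rows : List (List (String × String))) (primary_key : List String) (out : Int) : Decidable (Spec_duplicate_key_count_py rows primary_key out) := by unfold Spec_duplicate_key_count_py; infer_instance

-- ===== CLAIM (what is proved, stated in full; the proofs are below) =====
def Claim_equal_duplicate_key_count_py : Prop := ∀ (rows : List (List (String × String))) (primary_key : List String), Dom_duplicate_key_count_py rows primary_key → Spec_duplicate_key_count_py rows primary_key (duplicate_key_count_py rows primary_key)

-- ===== LEMMAS AND PROOFS =====

-- Loop invariant for A: the counter equals d + (#keys) - (growth of the seen set).
theorem pv_dup_loop {κ : Type} [BEq κ] [LawfulBEq κ]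
    (keys : List κ) (s : PySem.Set κ) (d : Int) :
    (keys.foldl
      (fun (st : PySem.Set κ × Int) k =>
        if PySem.Set.contains st.1 k then (st.1, st.2 + 1)
        else (PySem.Set.add st.1 k, st.2))
      (s, d)).2
    = d + keys.length - (PySem.Set.update s keys).length + s.length := by
  induction keys generalizing s d with
  | nil => simp [PySem.Set.update]
  | cons k ks ih =>
    simp only [List.foldl_cons]
    by_cases h : PySem.Set.contains s k = true
    · have hadd : PySem.Set.add s k = s := by rw [PySem.Set.add, if_pos h]
      rw [if_pos h, ih]
      have : PySem.Set.update s (k :: ks) = PySem.Set.update s ks := by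
        simp [PySem.Set.update, hadd]
      rw [this]
      push_cast [List.length_cons]
      omega
    · have hadd : PySem.Set.add s k = s ++ [k] := by rw [PySem.Set.add, if_neg h]
      rw [if_neg h, ih]
      have : PySem.Set.update s (k :: ks) = PySem.Set.update (s ++ [k]) ks := by
        simp [PySem.Set.update, hadd]
      rw [this, hadd]
      push_cast [List.length_cons, List.length_append, List.length_nil]
      omega

-- In a ≤-sorted list, #adjacent-equal pairs + #distinct elements = length.
theorem pv_adj_sorted {α : Type} [DecidableEq α] [BEq α] [LawfulBEq α] [LinearOrder α]
    (l : List α) (hs : l.Pairwise (fun a b => a ≤ b)) :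
    (l.zip (l.drop 1)).countP (fun p => p.1 == p.2) + l.toFinset.card = l.length := by
  induction l with
  | nil => simp
  | cons a t ih =>
    cases t with
    | nil => simp
    | cons b t' =>
      have hab : a ≤ b := (List.pairwise_cons.mp hs).1 b (by simp)
      have hst : (b :: t').Pairwise (fun a b => a ≤ b) := (List.pairwise_cons.mp hs).2
      have iht := ih hst
      have hz : ((a :: b :: t').zip ((a :: b :: t').drop 1))
          = (a, b) :: ((b :: t').zip ((b :: t').drop 1)) := by simp
      rw [hz, List.countP_cons]
      by_cases hEq : a = b
      · have hfin : (a :: b :: t').toFinset = (b :: t').toFinset := by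
          rw [List.toFinset_cons, Finset.insert_eq_self.mpr (by simp [hEq])]
        rw [hfin]
        have hif : (if ((fun p : α × α => p.1 == p.2) (a, b)) = true then 1 else 0) = 1 := by
          simp [hEq]
        rw [hif]
        simp only [List.length_cons] at *
        omega
      · have hnot : a ∉ b :: t' := by
          intro hmem
          rcases List.mem_cons.mp hmem with h | h
          · exact hEq h
          · have hbx : b ≤ a := (List.pairwise_cons.mp hst).1 a h
            exact hEq (le_antisymm hab hbx)
        have hcard : (a :: b :: t').toFinset.card = (b :: t').toFinset.card + 1 := by
          rw [List.toFinset_cons, Finset.card_insert_of_notMem (by simpa using hnot)]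
        rw [hcard]
        have hif : (if ((fun p : α × α => p.1 == p.2) (a, b)) = true then 1 else 0) = 0 := by
          simp [hEq]
        rw [hif]
        simp only [List.length_cons] at *
        omega

-- ===== VERDICT (by name: the statement is the Claim_ definition above) =====
theorem duplicate_key_count_py_spec : Claim_equal_duplicate_key_count_py := by
  intro rows primary_key _
  unfold Spec_duplicate_key_count_py duplicate_key_count_py duplicate_key_count_py_alt
  by_cases hpk : primary_key = []
  · simp [hpk]
  · rw [if_neg hpk, if_neg hpk]
    set ks := rows.map (fun row => primary_key.map (fun field => pvRowGet row field)) with hks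
    set srt := @PySem.List.sorted (List String) (List String) List.instLinearOrder.toLT LinearOrder.toDecidableLT ks (fun x => x) false with hsrt
    have hfold :
        (rows.foldl
          (fun (st : PySem.Set (List String) × Int) row =>
            let key := primary_key.map (fun field => pvRowGet row field)
            if PySem.Set.contains st.1 key then (st.1, st.2 + 1)
            else (PySem.Set.add st.1 key, st.2))
          (PySem.Set.empty, 0)).2
        = (ks.foldl
            (fun (st : PySem.Set (List String) × Int) k =>
              if PySem.Set.contains st.1 k then (st.1, st.2 + 1)
              else (PySem.Set.add st.1 k, st.2))
            (PySem.Set.empty, 0)).2 := by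
      rw [hks, List.foldl_map]
    rw [hfold, pv_dup_loop]
    have hupd : PySem.Set.update (PySem.Set.empty : PySem.Set (List String)) ks
        = PySem.Set.ofList ks := by
      rw [PySem.Set.ofList_eq_foldl]; rfl
    have hnd : (PySem.Set.ofList ks).Nodup := PySem.Set.nodup_ofList ks
    have hsetFin : (PySem.Set.ofList ks).toFinset = ks.toFinset := by
      ext x; simp [PySem.Set.mem_ofList]
    have hlen : (PySem.Set.ofList ks).length = ks.toFinset.card := by
      rw [← hsetFin, List.toFinset_card_of_nodup hnd]
    have hperm : srt.Perm ks := by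
      rw [hsrt]
      exact @PySem.List.sorted_perm _ _ List.instLinearOrder.toLT LinearOrder.toDecidableLT ks (fun x => x) false
    have hpw : srt.Pairwise (fun a b => a ≤ b) := by
      rw [hsrt]; exact PySem.List.sorted_pairwise ks (fun x => x)
    have hadj := pv_adj_sorted srt hpw
    have hcardeq : srt.toFinset.card = ks.toFinset.card := by
      rw [List.toFinset_eq_of_perm srt ks hperm]
    have hlensrt : srt.length = ks.length := hperm.length_eq
    rw [hupd, hlen]
    simp only [PySem.Set.empty, List.length_nil]
    omega
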